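-- pv_equiv track=rewrite | github.com/Sae-byeol/algorithm_PY | brute_force/bruteForce_2.py | solution
-- ===== SOURCE A (Python) =====
-- def solution(answers):
--     answer = []
--     s1=[1,2,3,4,5,1,2,3,4,5]
--     s2=[2,1,2,3,2,4,2,5]
--     s3=[3,3,1,1,2,2,4,4,5,5]
--
--     cnt1=0;
--     cnt2=0;
--     cnt3=0;
--     for i in range(0, len(answers)):
--         index=i%10;
--         index2 = i%8;
--         if (answers[i] == s1[index]): cnt1+=1;
--         if (answers[i] == s2[index2]): cnt2+=1;
--         if (answers[i] == s3[index]): cnt3+=1;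
--
--     maxi=max(cnt1,cnt2, cnt3);
--     if(cnt1 == maxi):
--         answer.append(1)
--     if(cnt2 == maxi):
--         answer.append(2);
--     if (cnt3 == maxi):
--         answer.append(3)
--
--     return answer
-- ===== SOURCE B (Python) =====
-- def solution(answers):
--     # Histogram strategy: tally answers once into buckets keyed by (i % 40, value)
--     # (40 = lcm of the three pattern lengths, so each pattern's expected answer at
--     # position i depends only on i % 40), then read every score off the histogram
--     # with a fixed 40-term sum.
--     hist = {}
--     for i, a in enumerate(answers):
--         key = (i % 40, a)
--         hist[key] = hist.get(key, 0) + 1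
--     patterns = [[1, 2, 3, 4, 5], [2, 1, 2, 3, 2, 4, 2, 5], [3, 3, 1, 1, 2, 2, 4, 4, 5, 5]]
--     scores = [sum(hist.get((r, p[r % len(p)]), 0) for r in range(40)) for p in patterns]
--     best = max(scores)
--     return [k + 1 for k in range(3) if scores[k] == best]
-- ===== Notes on version B (the rewrite author's own statement) =====
-- stated objective: alternative
-- what changed: Replaces A's fused loop that tests every answer against all three cyclic patterns with a histogram algorithm: one tally of answers into buckets keyed by (position mod 40, value) (40 = lcm of the pattern lengths), after which each pattern's score is read off the histogram as a fixed 40-term sum of lookups.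
import Mathlib
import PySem

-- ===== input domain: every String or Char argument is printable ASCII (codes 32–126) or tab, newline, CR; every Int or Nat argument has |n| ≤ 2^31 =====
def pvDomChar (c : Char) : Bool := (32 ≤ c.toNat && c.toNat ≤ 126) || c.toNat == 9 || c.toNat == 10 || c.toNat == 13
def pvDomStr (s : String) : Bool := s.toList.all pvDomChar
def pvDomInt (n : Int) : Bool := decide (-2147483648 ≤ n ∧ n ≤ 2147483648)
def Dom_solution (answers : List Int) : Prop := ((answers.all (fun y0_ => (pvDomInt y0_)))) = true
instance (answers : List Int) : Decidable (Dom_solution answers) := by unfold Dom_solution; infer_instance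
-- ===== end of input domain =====

-- B replaces A's fused counting loop over the three cyclic patterns with a histogram:
-- one tally of answers keyed by (i % 40, value) (40 = lcm of the pattern lengths),
-- then each score is a fixed 40-term sum of histogram lookups.

-- ===== PORT A =====
def solution (answers : List Int) : List Int :=
  let s1 : List Int := [1,2,3,4,5,1,2,3,4,5]
  let s2 : List Int := [2,1,2,3,2,4,2,5]
  let s3 : List Int := [3,3,1,1,2,2,4,4,5,5]
  let c : Int × Int × Int :=
    (PySem.List.pyRange 0 (answers.length : Int) 1).foldl (fun c i =>
      let index := PySem.Int.mod i 10
      let index2 := PySem.Int.mod i 8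
      let c1 := if PySem.List.pyGetD answers i 0 = PySem.List.pyGetD s1 index 0 then c.1 + 1 else c.1
      let c2 := if PySem.List.pyGetD answers i 0 = PySem.List.pyGetD s2 index2 0 then c.2.1 + 1 else c.2.1
      let c3 := if PySem.List.pyGetD answers i 0 = PySem.List.pyGetD s3 index 0 then c.2.2 + 1 else c.2.2
      (c1, c2, c3)) (0, 0, 0)
  let maxi : Int := max (max c.1 c.2.1) c.2.2
  let answer₁ : List Int := if c.1 = maxi then [1] else []
  let answer₂ : List Int := if c.2.1 = maxi then answer₁ ++ [2] else answer₁
  if c.2.2 = maxi then answer₂ ++ [3] else answer₂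

-- ===== PORT B =====
-- the tally loop: hist[(i % 40, a)] = hist.get((i % 40, a), 0) + 1
def histB (answers : List Int) : PySem.Dict (Int × Int) Int :=
  (PySem.List.enumerate answers 0).foldl (fun d ia =>
    let key : Int × Int := (PySem.Int.mod ia.1 40, ia.2)
    d.insert key (d.getD key 0 + 1)) PySem.Dict.empty

-- sum(hist.get((r, p[r % len(p)]), 0) for r in range(40))
def scoreB (h : PySem.Dict (Int × Int) Int) (p : List Int) : Int :=
  ((PySem.List.pyRange 0 40 1).map (fun r =>
    h.getD (r, PySem.List.pyGetD p (PySem.Int.mod r (p.length : Int)) 0) 0)).sum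

def solution_alt (answers : List Int) : List Int :=
  let hist := histB answers
  let patterns : List (List Int) := [[1,2,3,4,5], [2,1,2,3,2,4,2,5], [3,3,1,1,2,2,4,4,5,5]]
  let scores := patterns.map (fun p => scoreB hist p)
  let best := (PySem.List.max? scores id).getD 0  -- max(scores); scores has 3 elements, the default is dead
  ((PySem.List.pyRange 0 3 1).filter (fun k => PySem.List.pyGetD scores k 0 = best)).map (fun k => k + 1)

-- ===== PRECONDITION & SPEC =====
def Spec_solution (answers : List Int) (out : List Int) : Prop := out = solution_alt answers
instance (answers : List Int) (out : List Int) : Decidable (Spec_solution answers out) := by unfold Spec_solution; infer_instance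

-- ===== CLAIM (what is proved, stated in full; the proofs are below) =====
def Claim_equal_solution : Prop := ∀ (answers : List Int), Dom_solution answers → Spec_solution answers (solution answers)

-- ===== LEMMAS AND PROOFS =====

-- A indexes a hand-doubled pattern 1 with i % 10; B indexes the 5-long pattern with i % 5.
lemma pattern1_agree (i : Int) :
    PySem.List.pyGetD ([1,2,3,4,5,1,2,3,4,5] : List Int) (PySem.Int.mod i 10) 0
      = PySem.List.pyGetD ([1,2,3,4,5] : List Int) (PySem.Int.mod i 5) 0 := by
  have h10 : PySem.Int.mod i 10 = i % 10 := PySem.Int.mod_eq_emod_of_pos (by norm_num)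
  have h5 : PySem.Int.mod i 5 = i % 5 := PySem.Int.mod_eq_emod_of_pos (by norm_num)
  have hdvd : i % 5 = (i % 10) % 5 := (Int.emod_emod_of_dvd i (by norm_num)).symm
  rw [h10, h5, hdvd]
  have h0 : 0 ≤ i % 10 := Int.emod_nonneg i (by norm_num)
  have h1 : i % 10 < 10 := Int.emod_lt_of_pos i (by norm_num)
  interval_cases (i % 10) <;> decide

-- reducing an index mod 40 first does not change i % L when L divides 40
lemma mod_mod40 (i : Int) (L : Int) (hL : 0 < L) (hdvd : L ∣ 40) :
    PySem.Int.mod (PySem.Int.mod i 40) L = PySem.Int.mod i L := by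
  rw [PySem.Int.mod_eq_emod_of_pos (by norm_num : (0:Int) < 40),
      PySem.Int.mod_eq_emod_of_pos hL, PySem.Int.mod_eq_emod_of_pos hL,
      Int.emod_emod_of_dvd i hdvd]

-- B's histogram lookup is a count over the keyed projection of enumerate(answers)
lemma histB_getD (answers : List Int) (k : Int × Int) :
    (histB answers).getD k 0
      = (((PySem.List.enumerate answers 0).map (fun ia => (PySem.Int.mod ia.1 40, ia.2))).count k : Int) := by
  simp only [histB]
  have h1 : ((PySem.List.enumerate answers 0).map (fun ia => ((PySem.Int.mod ia.1 40, ia.2) : Int × Int))).foldl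
      (fun (d : PySem.Dict (Int × Int) Int) x => d.insert x (d.getD x 0 + 1)) PySem.Dict.empty
      = (PySem.List.enumerate answers 0).foldl
      (fun (d : PySem.Dict (Int × Int) Int) ia => d.insert (PySem.Int.mod ia.1 40, ia.2)
        (d.getD (PySem.Int.mod ia.1 40, ia.2) 0 + 1)) PySem.Dict.empty := by
    rw [List.foldl_map]
  rw [← h1, PySem.Dict.getD_foldl_insert_add_one, PySem.Dict.getD_empty]
  ring

-- one histogram indicator row sums to a single 0/1 term
lemma indicator_sum (m v : Int) (g : Int → Int) (hm : 0 ≤ m) (hm40 : m < 40) :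
    ((PySem.List.pyRange 0 40 1).map (fun r => if ((m, v) : Int × Int) = (r, g r) then (1:Int) else 0)).sum
      = if v = g m then 1 else 0 := by
  have hrw : (fun r => if ((m, v) : Int × Int) = (r, g r) then (1:Int) else 0)
      = (fun r => if ((fun r => decide (((m, v) : Int × Int) = (r, g r))) r : Bool) then (1:Int) else 0) := by
    funext r; simp
  rw [hrw, PySem.List.sum_map_ite_one_zero]
  by_cases hv : v = g m
  · have hc : List.countP (fun r => decide (((m, v) : Int × Int) = (r, g r))) (PySem.List.pyRange 0 40 1)
        = List.count m (PySem.List.pyRange 0 40 1) := by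
      rw [List.count]
      apply List.countP_congr
      intro r _
      simp only [decide_eq_true_eq, beq_iff_eq, Prod.mk.injEq]
      constructor
      · rintro ⟨rfl, _⟩; rfl
      · rintro rfl; exact ⟨rfl, hv⟩
    rw [hc, List.count_eq_one_of_mem (by decide) (PySem.List.mem_pyRange_one.mpr ⟨hm, hm40⟩)]
    simp [hv]
  · have hc : List.countP (fun r => decide (((m, v) : Int × Int) = (r, g r))) (PySem.List.pyRange 0 40 1) = 0 := by
      rw [List.countP_eq_zero]
      intro r _
      simp only [decide_eq_true_eq, Prod.mk.injEq, not_and]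
      rintro rfl; exact hv
    rw [hc]; simp [hv]

-- summing histogram counts along a pattern row counts the matching positions
lemma sum_count_eq_countP (g : Int → Int) (l : List (Int × Int)) (h : ∀ ia ∈ l, 0 ≤ ia.1) :
    ((PySem.List.pyRange 0 40 1).map (fun r =>
        ((l.map (fun ia => ((PySem.Int.mod ia.1 40, ia.2) : Int × Int))).count (r, g r) : Int))).sum
      = (l.countP (fun ia => ia.2 = g (PySem.Int.mod ia.1 40)) : Int) := by
  induction l with
  | nil => simp
  | cons x l ih =>
    have hx : (0:Int) ≤ x.1 := h x (by simp)
    have hl : ∀ ia ∈ l, (0:Int) ≤ ia.1 := fun ia hm => h ia (by simp [hm])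
    have hsplit : (fun r => (((x :: l).map (fun ia => ((PySem.Int.mod ia.1 40, ia.2) : Int × Int))).count (r, g r) : Int))
        = (fun r => ((l.map (fun ia => ((PySem.Int.mod ia.1 40, ia.2) : Int × Int))).count (r, g r) : Int)
            + (if (((PySem.Int.mod x.1 40, x.2)) : Int × Int) = (r, g r) then (1:Int) else 0)) := by
      funext r
      rw [List.map_cons, List.count_cons]
      by_cases hif : ((PySem.Int.mod x.1 40, x.2) : Int × Int) = (r, g r) <;> simp_all
    rw [hsplit, PySem.List.sum_map_add_int, ih hl,
        indicator_sum (PySem.Int.mod x.1 40) x.2 g (PySem.Int.mod_nonneg _ (by norm_num)) (PySem.Int.mod_lt _ (by norm_num)),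
        List.countP_cons]
    split_ifs <;> simp_all

-- max of a 3-element list via Python's first-maximum fold
lemma max3 (a b c : Int) : (PySem.List.max? [a,b,c] id).getD 0 = max (max a b) c := by
  simp only [PySem.List.max?, List.foldl, id_eq]
  rw [max_def, max_def]
  split_ifs <;> simp_all <;> split_ifs <;> simp_all <;> omega

-- indices produced by enumerate(answers) are nonnegative
lemma enumerate_fst_nonneg (answers : List Int) :
    ∀ ia ∈ PySem.List.enumerate answers 0, (0:Int) ≤ ia.1 := by
  intro ia hm
  obtain ⟨k, hk, rfl⟩ := (PySem.List.mem_enumerate_iff _ _ _).mp hm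
  simp

-- B's score of a pattern, read off the histogram, counts the matching positions
lemma scoreB_histB (answers p : List Int) :
    scoreB (histB answers) p
      = ((PySem.List.enumerate answers 0).countP
          (fun ia => ia.2 = PySem.List.pyGetD p (PySem.Int.mod (PySem.Int.mod ia.1 40) (p.length : Int)) 0) : Int) := by
  unfold scoreB
  simp only [histB_getD]
  rw [sum_count_eq_countP (fun r => PySem.List.pyGetD p (PySem.Int.mod r (p.length : Int)) 0)
      (PySem.List.enumerate answers 0) (enumerate_fst_nonneg answers)]

-- A's per-element test for pattern 1 equals B's (mod-40 bucket) test
lemma countA_eq_1 (answers : List Int) :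
    List.countP (fun ia => decide (ia.2 = PySem.List.pyGetD ([1,2,3,4,5,1,2,3,4,5] : List Int) (PySem.Int.mod ia.1 10) 0)) (PySem.List.enumerate answers 0)
      = List.countP (fun ia => decide (ia.2 = PySem.List.pyGetD ([1,2,3,4,5] : List Int) (PySem.Int.mod (PySem.Int.mod ia.1 40) ((([1,2,3,4,5] : List Int).length : Int))) 0)) (PySem.List.enumerate answers 0) := by
  apply List.countP_congr
  intro ia hm
  have : (([1,2,3,4,5] : List Int).length : Int) = 5 := rfl
  rw [this, mod_mod40 ia.1 5 (by norm_num) (by norm_num), ← pattern1_agree ia.1]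

-- same for pattern 2 (length 8 divides 40)
lemma countA_eq_2 (answers : List Int) :
    List.countP (fun ia => decide (ia.2 = PySem.List.pyGetD ([2,1,2,3,2,4,2,5] : List Int) (PySem.Int.mod ia.1 8) 0)) (PySem.List.enumerate answers 0)
      = List.countP (fun ia => decide (ia.2 = PySem.List.pyGetD ([2,1,2,3,2,4,2,5] : List Int) (PySem.Int.mod (PySem.Int.mod ia.1 40) ((([2,1,2,3,2,4,2,5] : List Int).length : Int))) 0)) (PySem.List.enumerate answers 0) := by
  apply List.countP_congr
  intro ia hm
  have : (([2,1,2,3,2,4,2,5] : List Int).length : Int) = 8 := rfl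
  rw [this, mod_mod40 ia.1 8 (by norm_num) (by norm_num)]

-- same for pattern 3 (length 10 divides 40)
lemma countA_eq_3 (answers : List Int) :
    List.countP (fun ia => decide (ia.2 = PySem.List.pyGetD ([3,3,1,1,2,2,4,4,5,5] : List Int) (PySem.Int.mod ia.1 10) 0)) (PySem.List.enumerate answers 0)
      = List.countP (fun ia => decide (ia.2 = PySem.List.pyGetD ([3,3,1,1,2,2,4,4,5,5] : List Int) (PySem.Int.mod (PySem.Int.mod ia.1 40) ((([3,3,1,1,2,2,4,4,5,5] : List Int).length : Int))) 0)) (PySem.List.enumerate answers 0) := by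
  apply List.countP_congr
  intro ia hm
  have : (([3,3,1,1,2,2,4,4,5,5] : List Int).length : Int) = 10 := rfl
  rw [this, mod_mod40 ia.1 10 (by norm_num) (by norm_num)]

-- ===== VERDICT (by name: the statement is the Claim_ definition above) =====
theorem solution_spec : Claim_equal_solution := by
  intro answers _
  unfold Spec_solution solution solution_alt
  simp only []
  -- A's loop over range(len(answers)) is a loop over enumerate
  rw [show (PySem.List.pyRange 0 (answers.length : Int) 1).foldl (fun (c : Int × Int × Int) i =>
      let index := PySem.Int.mod i 10
      let index2 := PySem.Int.mod i 8
      let c1 := if PySem.List.pyGetD answers i 0 = PySem.List.pyGetD ([1,2,3,4,5,1,2,3,4,5] : List Int) index 0 then c.1 + 1 else c.1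
      let c2 := if PySem.List.pyGetD answers i 0 = PySem.List.pyGetD ([2,1,2,3,2,4,2,5] : List Int) index2 0 then c.2.1 + 1 else c.2.1
      let c3 := if PySem.List.pyGetD answers i 0 = PySem.List.pyGetD ([3,3,1,1,2,2,4,4,5,5] : List Int) index 0 then c.2.2 + 1 else c.2.2
      (c1, c2, c3)) ((0 : Int), (0 : Int), (0 : Int))
    = (PySem.List.enumerate answers 0).foldl (fun (c : Int × Int × Int) ia =>
      ((if ia.2 = PySem.List.pyGetD ([1,2,3,4,5,1,2,3,4,5] : List Int) (PySem.Int.mod ia.1 10) 0 then c.1 + 1 else c.1),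
       (if ia.2 = PySem.List.pyGetD ([2,1,2,3,2,4,2,5] : List Int) (PySem.Int.mod ia.1 8) 0 then c.2.1 + 1 else c.2.1),
       (if ia.2 = PySem.List.pyGetD ([3,3,1,1,2,2,4,4,5,5] : List Int) (PySem.Int.mod ia.1 10) 0 then c.2.2 + 1 else c.2.2)) )
      ((0 : Int), (0 : Int), (0 : Int)) from by
    rw [PySem.List.enumerate_eq_map_pyRange (d := 0), List.foldl_map]; rfl]
  rw [PySem.List.foldl_prod_mk
      (f := fun (acc : Int) (ia : Int × Int) => if ia.2 = PySem.List.pyGetD ([1,2,3,4,5,1,2,3,4,5] : List Int) (PySem.Int.mod ia.1 10) 0 then acc + 1 else acc)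
      (g := fun (acc : Int × Int) (ia : Int × Int) =>
        ((if ia.2 = PySem.List.pyGetD ([2,1,2,3,2,4,2,5] : List Int) (PySem.Int.mod ia.1 8) 0 then acc.1 + 1 else acc.1),
         (if ia.2 = PySem.List.pyGetD ([3,3,1,1,2,2,4,4,5,5] : List Int) (PySem.Int.mod ia.1 10) 0 then acc.2 + 1 else acc.2)))]
  rw [PySem.List.foldl_prod_mk
      (f := fun (acc : Int) (ia : Int × Int) => if ia.2 = PySem.List.pyGetD ([2,1,2,3,2,4,2,5] : List Int) (PySem.Int.mod ia.1 8) 0 then acc + 1 else acc)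
      (g := fun (acc : Int) (ia : Int × Int) => if ia.2 = PySem.List.pyGetD ([3,3,1,1,2,2,4,4,5,5] : List Int) (PySem.Int.mod ia.1 10) 0 then acc + 1 else acc)]
  rw [PySem.List.foldl_ite_add_one, PySem.List.foldl_ite_add_one, PySem.List.foldl_ite_add_one]
  rw [countA_eq_1, countA_eq_2, countA_eq_3]
  simp only [List.map_cons, List.map_nil]
  simp only [scoreB_histB]
  set n1 : Int := (List.countP (fun ia => decide (ia.2 = PySem.List.pyGetD ([1,2,3,4,5] : List Int) (PySem.Int.mod (PySem.Int.mod ia.1 40) ((([1,2,3,4,5] : List Int).length : Int))) 0)) (PySem.List.enumerate answers 0) : Int) with hn1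
  set n2 : Int := (List.countP (fun ia => decide (ia.2 = PySem.List.pyGetD ([2,1,2,3,2,4,2,5] : List Int) (PySem.Int.mod (PySem.Int.mod ia.1 40) ((([2,1,2,3,2,4,2,5] : List Int).length : Int))) 0)) (PySem.List.enumerate answers 0) : Int) with hn2
  set n3 : Int := (List.countP (fun ia => decide (ia.2 = PySem.List.pyGetD ([3,3,1,1,2,2,4,4,5,5] : List Int) (PySem.Int.mod (PySem.Int.mod ia.1 40) ((([3,3,1,1,2,2,4,4,5,5] : List Int).length : Int))) 0)) (PySem.List.enumerate answers 0) : Int) with hn3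
  rw [max3]
  rw [show PySem.List.pyRange 0 3 1 = [0,1,2] from rfl]
  simp only [List.filter_cons, List.filter_nil, decide_eq_true_eq, zero_add]
  rw [show PySem.List.pyGetD [n1, n2, n3] 0 0 = n1 from rfl,
      show PySem.List.pyGetD [n1, n2, n3] 1 0 = n2 from rfl,
      show PySem.List.pyGetD [n1, n2, n3] 2 0 = n3 from rfl]
  split_ifs <;> rfl
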